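/- GENERATED by farm/mkstatement.py from design/units.tsv (unit `GifAddExtensionBlock.1`) and the assertions of Gif/Spec/Seg_GifAddExtensionBlock.lean — do not edit.
   THE STATEMENT of the proof unit `GifAddExtensionBlock.1`: segment 1 of `GifAddExtensionBlock` (40 instructions; entries 0x107b40;
   exits 0x107ba6,0x107c4d; ranges 0x107b40-0x107ba6,0x107c24-0x107c48)
   takes each of its entry assertions to one of its exit assertions (`Gif.Spec.GifAddExtensionBlock.Seg1`), given the contracts of its callees.
   What the names mean: ProgX/Base/Spec/Basic.lean (the shared hypotheses), Gif/Spec/Seg_GifAddExtensionBlock.lean (the assertions). The theorem to prove: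
   `theorem GifAddExtensionBlock_1_ok : Gif.Spec.GifAddExtensionBlock_1.Statement`. -/
import Gif.Code
import Gif.Dec.All
import Gif.Labels
import Gif.Spec.Alloc
import Gif.Spec.Seg_GifAddExtensionBlock
import ProgX.Base.Spec.Heap
namespace Gif.Spec.GifAddExtensionBlock_1
open X86 X86.User Asan

/-- The statement of unit `GifAddExtensionBlock.1`. -/
def Statement : Prop :=
  ∀ (Lay : Layout) (_hLay : Lay.hi = 0x1000000) (μ : Microarch) (_hμ : UserX.MicroOK μ) (u₀ : State)
    (_hcode : HasCodeNat Lay u₀ Gif.L.GifAddExtensionBlock.entry Gif.Code.code_GifAddExtensionBlock.nat Gif.L.GifAddExtensionBlock.size)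
    (_h_openbsd_reallocarray : ∀ (H : Heap) (rest : List Obj) (frames : List (Nat × FrameLayout)) (n c : Nat), Calls Lay μ ProgX.Base.WayInv (ProgX.Base.conv u₀) Gif.L.openbsd_reallocarray.entry (Gif.Spec.openbsd_reallocarray.spec H rest frames n c))
    (_h_malloc : ∀ (H : Heap) (rest : List Obj) (frames : List (Nat × FrameLayout)), Calls Lay μ ProgX.Base.WayInv (ProgX.Base.conv u₀) ProgX.Base.L.malloc.entry (ProgX.Base.Spec.malloc.spec H rest frames))
    (_h_asan_load8_noabort : Asan.SmallCheck Lay μ ProgX.Base.WayInv (ProgX.Base.CodeOK u₀) [.rax, .rcx, .rdx] 8 ProgX.Base.L.__asan_load8_noabort.entry)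
    (_h_asan_load4_noabort : Asan.SmallCheck Lay μ ProgX.Base.WayInv (ProgX.Base.CodeOK u₀) [.rax, .rcx, .rdx] 4 ProgX.Base.L.__asan_load4_noabort.entry)
    (_h_asan_store8_noabort : Asan.SmallCheck Lay μ ProgX.Base.WayInv (ProgX.Base.CodeOK u₀) [.rax, .rcx, .rdx] 8 ProgX.Base.L.__asan_store8_noabort.entry),
    Gif.Spec.GifAddExtensionBlock.Seg1 Lay μ u₀

end Gif.Spec.GifAddExtensionBlock_1
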